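-- pv_equiv track=rewrite | github.com/sesonli/ATLAS | Creat_graph_noncanonical.py | string2vector
-- ===== SOURCE A (Python) =====
-- def string2vector(line, char_to_vector, current_section):
--     vector_sum = [0] * len(char_to_vector) # label vector
--     parts = line.split(':') # divided the string by :
--     if len(parts) > 1:
--         part1 = parts[1].strip() # remove leading and trailing whitespaces
--         elements = part1.split(' ')
--         if current_section == "base_pairs":
--             filtered_elements = [elem for elem in elements if '/' in elem]
--         else:
--             filtered_elements = elements
--         for elem in filtered_elements:
--             vector = char_to_vector.get(elem, None)
--             if vector:
--                 #Sum for all meet vectors, because it is treated no order.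
--                 vector_sum = [sum(x) for x in zip(vector_sum, vector)]
--     return vector_sum
-- ===== SOURCE B (Python) =====
-- def string2vector(line, char_to_vector, current_section):
--     parts = line.split(':')
--     if len(parts) <= 1:
--         return [0] * len(char_to_vector)
--     tokens = parts[1].strip().split(' ')
--     if current_section == "base_pairs":
--         tokens = [t for t in tokens if '/' in t]
--     rows = [[0] * len(char_to_vector)]
--     for t in tokens:
--         v = char_to_vector.get(t)
--         if v:
--             rows.append(v)
--     return [sum(col) for col in zip(*rows)]
-- ===== Notes on version B (the rewrite author's own statement) =====
-- stated objective: alternative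
-- what changed: B replaces A's in-loop pairwise zip-accumulation by a two-stage transpose scheme: it collects the matched non-empty label vectors as rows (headed by a zero row of the dict's length, which is what caps the result length), then returns the column sums of zip(*rows).
import Mathlib
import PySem

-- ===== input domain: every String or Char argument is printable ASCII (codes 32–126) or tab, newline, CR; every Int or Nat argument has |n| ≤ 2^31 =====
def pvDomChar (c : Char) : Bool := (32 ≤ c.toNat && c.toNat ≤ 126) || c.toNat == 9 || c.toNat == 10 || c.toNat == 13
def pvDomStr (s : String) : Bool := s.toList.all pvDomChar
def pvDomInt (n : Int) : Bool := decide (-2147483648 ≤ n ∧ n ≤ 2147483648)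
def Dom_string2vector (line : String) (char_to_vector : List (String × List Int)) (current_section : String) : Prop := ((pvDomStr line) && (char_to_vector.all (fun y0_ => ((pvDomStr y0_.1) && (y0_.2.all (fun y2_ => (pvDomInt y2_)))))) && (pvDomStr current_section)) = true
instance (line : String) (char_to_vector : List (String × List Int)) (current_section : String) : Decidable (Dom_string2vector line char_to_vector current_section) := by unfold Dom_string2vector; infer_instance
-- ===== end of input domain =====

-- B replaces A's in-loop pairwise zip-accumulation by a two-stage transpose scheme:
-- collect matched non-empty label vectors as rows under a zero row, then sum each
-- column of the truncating transpose (alternative decomposition, same cost).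


-- ===== PORT A =====
def string2vector (line : String) (char_to_vector : List (String × List Int)) (current_section : String) : List Int :=
  let vector_sum : List Int := List.replicate char_to_vector.length 0
  let parts := (PySem.Str.split? line ":").getD []   -- ':' is nonempty, so split? is always `some`
  if parts.length > 1 then
    let part1 := PySem.Str.strip parts[1]!
    let elements := (PySem.Str.split? part1 " ").getD []
    let filtered_elements :=
      if current_section == "base_pairs" then elements.filter (fun e => PySem.Str.isIn "/" e)
      else elements
    filtered_elements.foldl (fun vs elem =>
      match (PySem.Dict.mk char_to_vector).get? elem with
      | some v => if v.isEmpty then vs else (List.zip vs v).map (fun x => x.1 + x.2)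
      | none => vs) vector_sum
  else vector_sum

-- ===== PORT B =====
-- the `for t in tokens: … rows.append(v)` loop of Source B, written as structural recursion
def pvRows (d : PySem.Dict String (List Int)) : List String → List (List Int)
  | [] => []
  | t :: ts =>
    match d.get? t with
    | some v => if v.isEmpty then pvRows d ts else v :: pvRows d ts
    | none => pvRows d ts

-- `[sum(col) for col in zip(*rows)]` with rows = first :: rest: zip(*…) truncates at the
-- shortest row, so walk the first row structurally, emitting head-sums while every other
-- row is also nonempty
def pvColSums (first : List Int) (rest : List (List Int)) : List Int :=
  match first with
  | [] => []
  | x :: xs =>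
    if rest.all (fun r => !r.isEmpty) then
      (x + (rest.map (fun r => r.headD 0)).sum) :: pvColSums xs (rest.map List.tail)
    else []

def string2vector_alt (line : String) (char_to_vector : List (String × List Int)) (current_section : String) : List Int :=
  let parts := (PySem.Str.split? line ":").getD []
  if parts.length ≤ 1 then List.replicate char_to_vector.length 0
  else
    let tokens0 := (PySem.Str.split? (PySem.Str.strip parts[1]!) " ").getD []
    let tokens :=
      if current_section == "base_pairs" then tokens0.filter (fun t => PySem.Str.isIn "/" t)
      else tokens0
    pvColSums (List.replicate char_to_vector.length 0) (pvRows (PySem.Dict.mk char_to_vector) tokens)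

-- ===== PRECONDITION & SPEC =====
def Spec_string2vector (line : String) (char_to_vector : List (String × List Int)) (current_section : String) (out : List Int) : Prop := out = string2vector_alt line char_to_vector current_section
instance (line : String) (char_to_vector : List (String × List Int)) (current_section : String) (out : List Int) : Decidable (Spec_string2vector line char_to_vector current_section out) := by unfold Spec_string2vector; infer_instance

-- ===== CLAIM (what is proved, stated in full; the proofs are below) =====
def Claim_equal_string2vector : Prop := ∀ (line : String) (char_to_vector : List (String × List Int)) (current_section : String), Dom_string2vector line char_to_vector current_section → Spec_string2vector line char_to_vector current_section (string2vector line char_to_vector current_section)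

-- ===== LEMMAS AND PROOFS =====

-- the column sums of a single row are the row itself
lemma colSums_single (vs : List Int) : pvColSums vs [] = vs := by
  induction vs with
  | nil => rfl
  | cons x xs ih => simp [pvColSums, ih]

-- merging the first two rows by their (truncating) pointwise sum preserves the column sums
lemma colSums_merge (a : List Int) (b : List Int) (ms : List (List Int)) :
    pvColSums (List.zipWith (· + ·) a b) ms = pvColSums a (b :: ms) := by
  induction a generalizing b ms with
  | nil => rfl
  | cons x a ih =>
    cases b with
    | nil => simp [pvColSums]
    | cons y b =>
      by_cases hm : ms.all (fun r => !r.isEmpty)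
      · simp only [List.zipWith_cons_cons, pvColSums, List.all_cons, List.isEmpty_cons,
          Bool.not_false, Bool.true_and, hm, if_true, List.map_cons, List.sum_cons,
          List.headD_cons, List.tail_cons]
        exact congrArg₂ List.cons (by omega) (ih b (ms.map List.tail))
      · simp [pvColSums, hm]

-- A's accumulating loop is pvColSums of the seed row consed on the remaining rows
lemma foldl_zipsum_eq_colSums (ms : List (List Int)) (vs : List Int) :
    ms.foldl (fun a v => (List.zip a v).map (fun x => x.1 + x.2)) vs = pvColSums vs ms := by
  induction ms generalizing vs with
  | nil => simp [colSums_single]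
  | cons v ms ih =>
    have hzip : (List.zip vs v).map (fun x : Int × Int => x.1 + x.2) = List.zipWith (· + ·) vs v := by
      simp [List.zip, List.map_zipWith]
    rw [List.foldl_cons, hzip, ih, colSums_merge]

-- A's match-and-skip loop body visits exactly the rows pvRows collects
lemma foldl_step_eq_rows (ctv : List (String × List Int)) (l : List String) (init : List Int) :
    l.foldl (fun vs elem =>
        match (PySem.Dict.mk ctv).get? elem with
        | some v => if v.isEmpty then vs else (List.zip vs v).map (fun x => x.1 + x.2)
        | none => vs) init
      = (pvRows (PySem.Dict.mk ctv) l).foldl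
          (fun a v => (List.zip a v).map (fun x => x.1 + x.2)) init := by
  induction l generalizing init with
  | nil => rfl
  | cons e l ih =>
    simp only [List.foldl_cons, pvRows]
    cases (PySem.Dict.mk ctv).get? e with
    | none => exact ih init
    | some v =>
      by_cases hv : v.isEmpty <;>
        simp only [hv, if_true, if_false, Bool.false_eq_true, List.foldl_cons] <;> exact ih _

theorem string2vector_eq (line : String) (char_to_vector : List (String × List Int))
    (current_section : String) :
    string2vector line char_to_vector current_section
      = string2vector_alt line char_to_vector current_section := by
  unfold string2vector string2vector_alt
  by_cases h : ((PySem.Str.split? line ":").getD []).length ≤ 1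
  · simp [h, Nat.not_lt.mpr h]
  · simp only [gt_iff_lt, Nat.not_le.mp h, if_pos, if_neg h]
    rw [foldl_step_eq_rows, foldl_zipsum_eq_colSums]

-- ===== VERDICT (by name: the statement is the Claim_ definition above) =====
theorem string2vector_spec : Claim_equal_string2vector := by
  intro line ctv cs _
  unfold Spec_string2vector
  exact string2vector_eq line ctv cs
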